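-- pv_equiv track=rewrite | github.com/fhalab/LevSeq | minION/analyser_bayes_AF.py | add_neighbouring_positions
-- ===== SOURCE A (Python) =====
-- def add_neighbouring_positions(positions, nb_neighbours, max_index):
--     if positions is None:
--         return None
--
--     elif isinstance(positions, int):
--         positions = [positions]
--
--     new_positions = []
--     for position in positions:
--         for new_pos in range(position - nb_neighbours, position + nb_neighbours + 1):
--             if 1 <= new_pos <= max_index:  # Check if the new position is within valid index range
--                 new_positions.append(new_pos)
--     return sorted(set(new_positions))
-- ===== SOURCE B (Python) =====
-- def add_neighbouring_positions(positions, nb_neighbours, max_index):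
--     if positions is None:
--         return None
--     if isinstance(positions, int):
--         positions = [positions]
--     merged = []          # finished disjoint intervals, in increasing order
--     cur = None           # currently open interval (lo, hi)
--     for p in sorted(positions):
--         lo = max(1, p - nb_neighbours)
--         hi = min(max_index, p + nb_neighbours)
--         if lo > hi:
--             continue
--         if cur is None:
--             cur = (lo, hi)
--         elif lo <= cur[1] + 1:
--             cur = (cur[0], max(cur[1], hi))
--         else:
--             merged.append(cur)
--             cur = (lo, hi)
--     if cur is not None:
--         merged.append(cur)
--     out = []
--     for lo, hi in merged:
--         out.extend(range(lo, hi + 1))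
--     return out
-- ===== Notes on version B (the rewrite author's own statement) =====
-- stated objective: alternative
-- what changed: Instead of materialising every neighbour of every position and then deduplicating and sorting the whole expanded list, B sorts the positions, merges their clipped windows into disjoint intervals in one sweep, and expands the disjoint intervals directly, so no set or final sort over the expanded list is needed.
import Mathlib
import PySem

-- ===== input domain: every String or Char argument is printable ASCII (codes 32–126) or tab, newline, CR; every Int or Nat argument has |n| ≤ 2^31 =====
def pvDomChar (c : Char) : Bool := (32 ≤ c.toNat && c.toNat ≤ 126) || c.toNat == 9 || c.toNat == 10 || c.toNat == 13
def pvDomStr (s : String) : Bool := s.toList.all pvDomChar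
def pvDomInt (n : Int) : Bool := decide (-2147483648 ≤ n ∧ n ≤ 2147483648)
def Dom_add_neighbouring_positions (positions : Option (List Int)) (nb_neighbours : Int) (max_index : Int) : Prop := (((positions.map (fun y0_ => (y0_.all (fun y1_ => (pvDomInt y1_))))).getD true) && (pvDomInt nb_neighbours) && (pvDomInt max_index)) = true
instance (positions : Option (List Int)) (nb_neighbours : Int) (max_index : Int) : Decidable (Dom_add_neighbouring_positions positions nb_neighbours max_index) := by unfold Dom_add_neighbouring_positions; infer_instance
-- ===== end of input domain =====

-- B sorts the positions, merges the clipped neighbour windows into disjoint intervals in one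
-- sweep and expands those intervals, instead of A's expand-everything-then-dedup-and-sort.

-- ===== PORT A =====
def add_neighbouring_positions (positions : Option (List Int)) (nb_neighbours : Int) (max_index : Int) : Option (List Int) :=
  match positions with
  | none => none
  | some ps =>
    let new_positions : List Int := ps.foldl (fun acc position =>
      (PySem.List.pyRange (position - nb_neighbours) (position + nb_neighbours + 1) 1).foldl
        (fun acc2 new_pos => if 1 ≤ new_pos ∧ new_pos ≤ max_index then acc2 ++ [new_pos] else acc2)
        acc) []
    some (PySem.List.sorted (PySem.Set.ofList new_positions) (fun x => x) false)

-- ===== PORT B =====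
-- one iteration of B's merging loop; state = (finished intervals, currently open interval)
def pvAltStep (nb_neighbours max_index : Int) (st : List (Int × Int) × Option (Int × Int)) (p : Int) :
    List (Int × Int) × Option (Int × Int) :=
  let lo := max 1 (p - nb_neighbours)
  let hi := min max_index (p + nb_neighbours)
  if lo > hi then st
  else
    match st.2 with
    | none => (st.1, some (lo, hi))
    | some c => if lo ≤ c.2 + 1 then (st.1, some (c.1, max c.2 hi)) else (st.1 ++ [c], some (lo, hi))

def add_neighbouring_positions_alt (positions : Option (List Int)) (nb_neighbours : Int) (max_index : Int) : Option (List Int) :=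
  match positions with
  | none => none
  | some ps =>
    let st := (PySem.List.sorted ps (fun x => x) false).foldl (pvAltStep nb_neighbours max_index) ([], none)
    let merged := match st.2 with
      | none => st.1
      | some c => st.1 ++ [c]
    some (merged.foldl (fun out r => out ++ PySem.List.pyRange r.1 (r.2 + 1) 1) [])

-- ===== PRECONDITION & SPEC =====
def Spec_add_neighbouring_positions (positions : Option (List Int)) (nb_neighbours : Int) (max_index : Int) (out : Option (List Int)) : Prop := out = add_neighbouring_positions_alt positions nb_neighbours max_index
instance (positions : Option (List Int)) (nb_neighbours : Int) (max_index : Int) (out : Option (List Int)) : Decidable (Spec_add_neighbouring_positions positions nb_neighbours max_index out) := by unfold Spec_add_neighbouring_positions; infer_instance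

-- ===== CLAIM (what is proved, stated in full; the proofs are below) =====
def Claim_equal_add_neighbouring_positions : Prop := ∀ (positions : Option (List Int)) (nb_neighbours : Int) (max_index : Int), Dom_add_neighbouring_positions positions nb_neighbours max_index → Spec_add_neighbouring_positions positions nb_neighbours max_index (add_neighbouring_positions positions nb_neighbours max_index)

-- ===== LEMMAS AND PROOFS =====

-- expansion of an interval list
def pvExp (M : List (Int × Int)) : List Int := M.flatMap (fun r => PySem.List.pyRange r.1 (r.2 + 1) 1)

lemma pvExp_mem (M : List (Int × Int)) (x : Int) :
    x ∈ pvExp M ↔ ∃ r ∈ M, r.1 ≤ x ∧ x ≤ r.2 := by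
  simp only [pvExp, List.mem_flatMap, PySem.List.mem_pyRange_one]
  constructor
  · rintro ⟨r, hr, h1, h2⟩; exact ⟨r, hr, h1, by omega⟩
  · rintro ⟨r, hr, h1, h2⟩; exact ⟨r, hr, h1, by omega⟩

-- the covered set of a list of positions
def pvCov (ps : List Int) (nb mx x : Int) : Prop := ∃ p ∈ ps, max 1 (p - nb) ≤ x ∧ x ≤ min mx (p + nb)

lemma pvCov_cons (p : Int) (rest : List Int) (nb mx x : Int) :
    pvCov (p :: rest) nb mx x ↔ (max 1 (p - nb) ≤ x ∧ x ≤ min mx (p + nb)) ∨ pvCov rest nb mx x := by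
  simp [pvCov, List.mem_cons, exists_eq_or_imp]

-- loop invariant of B's sweep
def pvInv (nb _mx : Int) (st : List (Int × Int) × Option (Int × Int)) (rest : List Int) : Prop :=
  match st.2 with
  | none => st.1 = []
  | some c =>
      st.1.Pairwise (fun r s => r.2 + 1 < s.1) ∧
      (∀ r ∈ st.1, r.1 ≤ r.2 ∧ r.2 + 1 < c.1) ∧ c.1 ≤ c.2 ∧
      (∀ p ∈ rest, c.1 ≤ max 1 (p - nb))

def pvMerged (st : List (Int × Int) × Option (Int × Int)) : List (Int × Int) :=
  match st.2 with
  | none => st.1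
  | some c => st.1 ++ [c]

lemma pvStep_inv (nb mx : Int) (st : List (Int × Int) × Option (Int × Int)) (p : Int) (rest : List Int)
    (hinv : pvInv nb mx st (p :: rest)) (hmono : ∀ q ∈ rest, p ≤ q) :
    pvInv nb mx (pvAltStep nb mx st p) rest := by
  obtain ⟨done, cur⟩ := st
  simp only [pvAltStep]
  split_ifs with hskip
  · cases cur with
    | none => exact hinv
    | some c =>
      obtain ⟨h1, h2, h3, h4⟩ := hinv
      exact ⟨h1, h2, h3, fun q hq => h4 q (List.mem_cons_of_mem _ hq)⟩
  · cases cur with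
    | none =>
      simp only [pvInv] at hinv ⊢
      subst hinv
      refine ⟨List.Pairwise.nil, by simp, by omega, ?_⟩
      intro q hq
      have := hmono q hq; omega
    | some c =>
      obtain ⟨h1, h2, h3, h4⟩ := hinv
      have hc := h4 p (List.mem_cons_self)
      simp only [pvInv]
      split_ifs with hmerge
      · refine ⟨h1, fun r hr => ⟨(h2 r hr).1, (h2 r hr).2⟩, by omega, ?_⟩
        intro q hq; exact h4 q (List.mem_cons_of_mem _ hq)
      · refine ⟨?_, ?_, by omega, ?_⟩
        · refine List.pairwise_append.2 ⟨h1, List.pairwise_singleton _ _, ?_⟩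
          intro r hr s hs; simp at hs; subst hs; exact (h2 r hr).2
        · intro r hr
          rcases List.mem_append.1 hr with hr | hr
          · exact ⟨(h2 r hr).1, by have := (h2 r hr).2; omega⟩
          · simp at hr; subst hr; exact ⟨h3, by omega⟩
        · intro q hq
          have := hmono q hq; omega

lemma pvStep_mem (nb mx : Int) (st : List (Int × Int) × Option (Int × Int)) (p : Int) (rest : List Int)
    (hinv : pvInv nb mx st (p :: rest)) (x : Int) :
    (x ∈ pvExp (pvMerged (pvAltStep nb mx st p)) ↔
      x ∈ pvExp (pvMerged st) ∨ (max 1 (p - nb) ≤ x ∧ x ≤ min mx (p + nb))) := by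
  obtain ⟨done, cur⟩ := st
  simp only [pvAltStep]
  split_ifs with hskip
  · constructor
    · exact fun h => Or.inl h
    · rintro (h | h); · exact h
      omega
  · cases cur with
    | none =>
      simp only [pvInv] at hinv; subst hinv
      simp only [pvMerged, pvExp_mem]
      simp
    | some c =>
      obtain ⟨h1, h2, h3, h4⟩ := hinv
      have hc := h4 p (List.mem_cons_self)
      simp only [pvMerged]
      split_ifs with hmerge
      · simp only [pvExp_mem, List.mem_append, List.mem_singleton]
        constructor
        · rintro ⟨r, hr | hr, ha, hb⟩
          · exact Or.inl ⟨r, Or.inl hr, ha, hb⟩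
          · subst hr
            simp only at ha hb
            by_cases hx : x ≤ c.2
            · exact Or.inl ⟨c, Or.inr rfl, ha, hx⟩
            · exact Or.inr ⟨by omega, by omega⟩
        · rintro (⟨r, hr | hr, ha, hb⟩ | ⟨ha, hb⟩)
          · exact ⟨r, Or.inl hr, ha, hb⟩
          · have ha' : c.1 ≤ x := hr ▸ ha
            have hb' : x ≤ c.2 := hr ▸ hb
            exact ⟨(c.1, max c.2 (min mx (p + nb))), Or.inr rfl, ha', by simp; omega⟩
          · exact ⟨(c.1, max c.2 (min mx (p + nb))), Or.inr rfl, by omega, by simp; omega⟩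
      · simp only [pvExp_mem, List.mem_append, List.mem_singleton]
        constructor
        · rintro ⟨r, (hr | hr) | hr, ha, hb⟩
          · exact Or.inl ⟨r, Or.inl hr, ha, hb⟩
          · exact Or.inl ⟨r, Or.inr hr, ha, hb⟩
          · subst hr; exact Or.inr ⟨ha, hb⟩
        · rintro (⟨r, hr | hr, ha, hb⟩ | ⟨ha, hb⟩)
          · exact ⟨r, Or.inl (Or.inl hr), ha, hb⟩
          · exact ⟨r, Or.inl (Or.inr hr), ha, hb⟩
          · exact ⟨(max 1 (p - nb), min mx (p + nb)), Or.inr rfl, ha, hb⟩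

-- the whole sweep keeps the invariant and its intervals cover exactly the covered set
lemma pvFold_spec (nb mx : Int) : ∀ (qs : List Int) (st : List (Int × Int) × Option (Int × Int)),
    pvInv nb mx st qs → qs.Pairwise (· ≤ ·) →
    pvInv nb mx (qs.foldl (pvAltStep nb mx) st) [] ∧
    (∀ x, x ∈ pvExp (pvMerged (qs.foldl (pvAltStep nb mx) st)) ↔
      x ∈ pvExp (pvMerged st) ∨ pvCov qs nb mx x) := by
  intro qs
  induction qs with
  | nil =>
    intro st hinv _
    exact ⟨hinv, fun x => by simp [pvCov]⟩
  | cons p rest ih =>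
    intro st hinv hsort
    have hmono := List.pairwise_cons.1 hsort
    have h1 := pvStep_inv nb mx st p rest hinv hmono.1
    obtain ⟨hfin, hmem⟩ := ih (pvAltStep nb mx st p) h1 hmono.2
    refine ⟨hfin, fun x => ?_⟩
    rw [List.foldl_cons, hmem x, pvStep_mem nb mx st p rest hinv x, pvCov_cons]
    tauto

-- expansion of a gapped list of nonempty intervals is strictly increasing
lemma pvExp_pairwise : ∀ (M : List (Int × Int)),
    M.Pairwise (fun r s => r.2 + 1 < s.1) → (∀ r ∈ M, r.1 ≤ r.2) →
    (pvExp M).Pairwise (· < ·) := by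
  intro M
  induction M with
  | nil => intro _ _; simp [pvExp]
  | cons r M ih =>
    intro hpw hne
    rw [List.pairwise_cons] at hpw
    have : pvExp (r :: M) = PySem.List.pyRange r.1 (r.2 + 1) 1 ++ pvExp M := by
      simp [pvExp]
    rw [this]
    refine List.pairwise_append.2 ⟨PySem.List.pairwise_lt_pyRange_one _ _, ih hpw.2 (fun s hs => hne s (List.mem_cons_of_mem _ hs)), ?_⟩
    intro a ha b hb
    rw [PySem.List.mem_pyRange_one] at ha
    obtain ⟨s, hs, hb1, _⟩ := (pvExp_mem M b).1 hb
    have := hpw.1 s hs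
    omega

-- A's collected list as a covered-set membership
lemma pvA_mem (ps : List Int) (nb mx x : Int) :
    (x ∈ ps.foldl (fun acc position =>
      (PySem.List.pyRange (position - nb) (position + nb + 1) 1).foldl
        (fun acc2 new_pos => if 1 ≤ new_pos ∧ new_pos ≤ mx then acc2 ++ [new_pos] else acc2)
        acc) []) ↔ pvCov ps nb mx x := by
  simp only [PySem.List.foldl_append_ite_eq_filter, PySem.List.foldl_append_eq_flatMap]
  simp only [List.nil_append, List.mem_flatMap, List.mem_filter, PySem.List.mem_pyRange_one, pvCov,
    decide_eq_true_eq]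
  constructor
  · rintro ⟨p, hp, ⟨h1, h2⟩, h3, h4⟩; exact ⟨p, hp, by omega, by omega⟩
  · rintro ⟨p, hp, h1, h2⟩; exact ⟨p, hp, ⟨by omega, by omega⟩, by omega, by omega⟩

-- ===== VERDICT (by name: the statement is the Claim_ definition above) =====
theorem add_neighbouring_positions_spec : Claim_equal_add_neighbouring_positions := by
  intro positions nb mx _
  unfold Spec_add_neighbouring_positions
  cases positions with
  | none => rfl
  | some ps =>
    simp only [add_neighbouring_positions, add_neighbouring_positions_alt]
    congr 1
    set L : List Int := ps.foldl (fun acc position =>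
      (PySem.List.pyRange (position - nb) (position + nb + 1) 1).foldl
        (fun acc2 new_pos => if 1 ≤ new_pos ∧ new_pos ≤ mx then acc2 ++ [new_pos] else acc2)
        acc) [] with hL
    set qs := PySem.List.sorted ps (fun x => x) false with hqs
    have hsort : qs.Pairwise (· ≤ ·) := PySem.List.sorted_pairwise ps (fun x => x)
    have hinv0 : pvInv nb mx ([], none) qs := rfl
    obtain ⟨hfin, hmem⟩ := pvFold_spec nb mx qs ([], none) hinv0 hsort
    set fin := qs.foldl (pvAltStep nb mx) ([], none) with hfin'
    have hout : (match fin.2 with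
        | none => fin.1
        | some c => fin.1 ++ [c]).foldl (fun (out : List Int) (r : Int × Int) => out ++ PySem.List.pyRange r.1 (r.2 + 1) 1) []
        = pvExp (pvMerged fin) := by
      rw [PySem.List.foldl_append_eq_flatMap (g := fun r : Int × Int => PySem.List.pyRange r.1 (r.2 + 1) 1)]
      simp [pvMerged, pvExp]
    rw [hout]
    -- the expansion is strictly increasing …
    have hpwM : (pvMerged fin).Pairwise (fun r s => r.2 + 1 < s.1) ∧ ∀ r ∈ pvMerged fin, r.1 ≤ r.2 := by
      unfold pvInv at hfin
      unfold pvMerged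
      cases h : fin.2 with
      | none => rw [h] at hfin; rw [hfin]; simp
      | some c =>
        rw [h] at hfin
        obtain ⟨h1, h2, h3, _⟩ := hfin
        constructor
        · refine List.pairwise_append.2 ⟨h1, List.pairwise_singleton _ _, ?_⟩
          intro r hr s hs; simp at hs; subst hs; exact (h2 r hr).2
        · intro r hr
          rcases List.mem_append.1 hr with hr | hr
          · exact (h2 r hr).1
          · simp at hr; subst hr; exact h3
    have hpwE : (pvExp (pvMerged fin)).Pairwise (· < ·) := pvExp_pairwise _ hpwM.1 hpwM.2
    -- … and has exactly the members of set(L)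
    have hmemE : ∀ x, x ∈ pvExp (pvMerged fin) ↔ x ∈ PySem.Set.ofList L := by
      intro x
      rw [hmem x, PySem.Set.mem_ofList]
      have : pvCov qs nb mx x ↔ pvCov ps nb mx x := by
        unfold pvCov
        constructor
        · rintro ⟨p, hp, h⟩; exact ⟨p, (PySem.List.mem_sorted ps (fun x => x) false p).1 hp, h⟩
        · rintro ⟨p, hp, h⟩; exact ⟨p, (PySem.List.mem_sorted ps (fun x => x) false p).2 hp, h⟩
      rw [this, hL]
      simp only [pvMerged, pvExp, List.flatMap_nil, List.not_mem_nil, false_or]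
      rw [pvA_mem]
    have hperm : (pvExp (pvMerged fin)).Perm (PySem.Set.ofList L) := by
      have hnd : (pvExp (pvMerged fin)).Nodup := hpwE.imp (fun h => ne_of_lt h)
      rw [List.perm_ext_iff_of_nodup hnd (PySem.Set.nodup_ofList L)]
      exact hmemE
    exact PySem.List.sorted_eq_of_perm_of_pairwise_lt _ _ _ hperm hpwE
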